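-- pv_equiv track=rewrite | github.com/Nyxll/shadowrun-gm | tools/check_schema.py | _types_match
-- ===== SOURCE A (Python) =====
-- def _types_match(expected: str, actual: str) -> bool:
--     """Check if two type names match (accounting for aliases)
--
--     Args:
--         expected: Expected type name
--         actual: Actual type name
--
--     Returns:
--         True if types match
--     """
--     # Normalize types
--     type_aliases = {
--         'integer': ['int4', 'integer'],
--         'text': ['text', 'varchar', 'character varying'],
--         'uuid': ['uuid'],
--         'boolean': ['bool', 'boolean'],
--         'numeric': ['numeric', 'decimal'],
--         'timestamp with time zone': ['timestamptz', 'timestamp with time zone'],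
--         'jsonb': ['jsonb'],
--         'ARRAY': ['ARRAY']
--     }
--
--     expected_lower = expected.lower()
--     actual_lower = actual.lower()
--
--     for canonical, aliases in type_aliases.items():
--         if expected_lower in aliases and actual_lower in aliases:
--             return True
--
--     return expected_lower == actual_lower
-- ===== SOURCE B (Python) =====
-- # B: precompute a reverse alias->group dict once; two lookups replace the per-group scan.
-- _TYPE_ALIASES = {
--     'integer': ['int4', 'integer'],
--     'text': ['text', 'varchar', 'character varying'],
--     'uuid': ['uuid'],
--     'boolean': ['bool', 'boolean'],
--     'numeric': ['numeric', 'decimal'],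
--     'timestamp with time zone': ['timestamptz', 'timestamp with time zone'],
--     'jsonb': ['jsonb'],
--     'ARRAY': ['ARRAY'],
-- }
-- _ALIAS_GROUP = {alias: canonical
--                 for canonical, aliases in _TYPE_ALIASES.items()
--                 for alias in aliases}
--
--
-- def _types_match(expected: str, actual: str) -> bool:
--     expected_lower = expected.lower()
--     actual_lower = actual.lower()
--     group = _ALIAS_GROUP.get(expected_lower)
--     if group is not None and _ALIAS_GROUP.get(actual_lower) == group:
--         return True
--     return expected_lower == actual_lower
-- ===== Notes on version B (the rewrite author's own statement) =====
-- stated objective: simpler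
-- what changed: Replaces the per-group membership-scanning loop with a reverse alias->canonical dict built once at module level; the function body becomes two lookups plus the lowercase-equality fallback.
import Mathlib
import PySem

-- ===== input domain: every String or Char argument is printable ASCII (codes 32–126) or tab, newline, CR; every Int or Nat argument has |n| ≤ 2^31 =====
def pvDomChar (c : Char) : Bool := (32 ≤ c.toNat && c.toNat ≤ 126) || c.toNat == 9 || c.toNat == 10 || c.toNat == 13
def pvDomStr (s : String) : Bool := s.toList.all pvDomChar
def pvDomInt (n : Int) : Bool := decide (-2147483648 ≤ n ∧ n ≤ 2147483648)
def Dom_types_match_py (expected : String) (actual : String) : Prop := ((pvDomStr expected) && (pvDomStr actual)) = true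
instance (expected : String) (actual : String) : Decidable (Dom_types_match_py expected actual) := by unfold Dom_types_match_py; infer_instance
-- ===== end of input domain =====

-- B replaces A's per-group alias scan with a reverse alias->canonical dict built once, then two lookups plus the lowercase-equality fallback (same results, simpler function body).


-- ===== PORT A =====
-- the type_aliases dict literal of A, iterated in insertion order (it is only iterated, never looked up)
def typeAliasesA : List (String × List String) :=
  [("integer", ["int4", "integer"]),
   ("text", ["text", "varchar", "character varying"]),
   ("uuid", ["uuid"]),
   ("boolean", ["bool", "boolean"]),
   ("numeric", ["numeric", "decimal"]),
   ("timestamp with time zone", ["timestamptz", "timestamp with time zone"]),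
   ("jsonb", ["jsonb"]),
   ("ARRAY", ["ARRAY"])]

-- the 'for canonical, aliases in type_aliases.items(): if … return True' loop with its early return
def aLoop (el al : String) : List (String × List String) → Bool
  | [] => el == al
  | (_, aliases) :: rest =>
      if aliases.contains el && aliases.contains al then true else aLoop el al rest

def types_match_py (expected : String) (actual : String) : Bool :=
  aLoop (PySem.Str.lower expected) (PySem.Str.lower actual) typeAliasesA

-- ===== PORT B =====
-- Source B's module-level dict comprehension _ALIAS_GROUP = {alias: canonical for canonical, aliases in … for alias in aliases}
-- (Source B's _TYPE_ALIASES literal is the same table as A's, shared here as typeAliasesA)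
def aliasGroup : PySem.Dict String String :=
  typeAliasesA.foldl (fun d p => p.2.foldl (fun d a => d.insert a p.1) d) PySem.Dict.empty

def types_match_py_alt (expected : String) (actual : String) : Bool :=
  let el := PySem.Str.lower expected
  let al := PySem.Str.lower actual
  match aliasGroup.get? el with
  | some g => if aliasGroup.get? al == some g then true else el == al
  | none => el == al

-- ===== PRECONDITION & SPEC =====
def Spec_types_match_py (expected : String) (actual : String) (out : Bool) : Prop := out = types_match_py_alt expected actual
instance (expected : String) (actual : String) (out : Bool) : Decidable (Spec_types_match_py expected actual out) := by unfold Spec_types_match_py; infer_instance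

-- ===== CLAIM (what is proved, stated in full; the proofs are below) =====
def Claim_equal_types_match_py : Prop := ∀ (expected : String) (actual : String), Dom_types_match_py expected actual → Spec_types_match_py expected actual (types_match_py expected actual)

-- ===== LEMMAS AND PROOFS =====

-- the reverse dict that B's module-level comprehension builds, as a literal (proof-only helper)
def aliasPairs : List (String × String) :=
  [("int4", "integer"), ("integer", "integer"), ("text", "text"), ("varchar", "text"), ("character varying", "text"), ("uuid", "uuid"), ("bool", "boolean"), ("boolean", "boolean"), ("numeric", "numeric"), ("decimal", "numeric"), ("timestamptz", "timestamp with time zone"), ("timestamp with time zone", "timestamp with time zone"), ("jsonb", "jsonb"), ("ARRAY", "ARRAY")]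

theorem aliasGroup_eq : aliasGroup = PySem.Dict.ofList aliasPairs := by decide

theorem items_aliasPairs : (PySem.Dict.ofList aliasPairs).items = aliasPairs := by decide

-- the reverse lookup, characterised as a chain of string tests
theorem lookup_spec (s : String) : (PySem.Dict.ofList aliasPairs).get? s =
    if s = "int4" then some "integer"
    else if s = "integer" then some "integer"
    else if s = "text" then some "text"
    else if s = "varchar" then some "text"
    else if s = "character varying" then some "text"
    else if s = "uuid" then some "uuid"
    else if s = "bool" then some "boolean"
    else if s = "boolean" then some "boolean"
    else if s = "numeric" then some "numeric"
    else if s = "decimal" then some "numeric"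
    else if s = "timestamptz" then some "timestamp with time zone"
    else if s = "timestamp with time zone" then some "timestamp with time zone"
    else if s = "jsonb" then some "jsonb"
    else if s = "ARRAY" then some "ARRAY"
    else none := by
  by_cases h0 : s = "int4"
  · subst h0; decide
  rw [if_neg h0]
  by_cases h1 : s = "integer"
  · subst h1; decide
  rw [if_neg h1]
  by_cases h2 : s = "text"
  · subst h2; decide
  rw [if_neg h2]
  by_cases h3 : s = "varchar"
  · subst h3; decide
  rw [if_neg h3]
  by_cases h4 : s = "character varying"
  · subst h4; decide
  rw [if_neg h4]
  by_cases h5 : s = "uuid"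
  · subst h5; decide
  rw [if_neg h5]
  by_cases h6 : s = "bool"
  · subst h6; decide
  rw [if_neg h6]
  by_cases h7 : s = "boolean"
  · subst h7; decide
  rw [if_neg h7]
  by_cases h8 : s = "numeric"
  · subst h8; decide
  rw [if_neg h8]
  by_cases h9 : s = "decimal"
  · subst h9; decide
  rw [if_neg h9]
  by_cases h10 : s = "timestamptz"
  · subst h10; decide
  rw [if_neg h10]
  by_cases h11 : s = "timestamp with time zone"
  · subst h11; decide
  rw [if_neg h11]
  by_cases h12 : s = "jsonb"
  · subst h12; decide
  rw [if_neg h12]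
  by_cases h13 : s = "ARRAY"
  · subst h13; decide
  rw [if_neg h13]
  rw [PySem.Dict.get?, items_aliasPairs]
  have hfind : List.find? (fun p : String × String => p.1 == s) aliasPairs = none := by
    rw [List.find?_eq_none]
    intro x hx
    fin_cases hx
    · exact fun hb => h0 (eq_of_beq hb).symm
    · exact fun hb => h1 (eq_of_beq hb).symm
    · exact fun hb => h2 (eq_of_beq hb).symm
    · exact fun hb => h3 (eq_of_beq hb).symm
    · exact fun hb => h4 (eq_of_beq hb).symm
    · exact fun hb => h5 (eq_of_beq hb).symm
    · exact fun hb => h6 (eq_of_beq hb).symm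
    · exact fun hb => h7 (eq_of_beq hb).symm
    · exact fun hb => h8 (eq_of_beq hb).symm
    · exact fun hb => h9 (eq_of_beq hb).symm
    · exact fun hb => h10 (eq_of_beq hb).symm
    · exact fun hb => h11 (eq_of_beq hb).symm
    · exact fun hb => h12 (eq_of_beq hb).symm
    · exact fun hb => h13 (eq_of_beq hb).symm
  rw [hfind]
  rfl

-- A's scanning loop agrees with B's two reverse lookups, for arbitrary (lowered) strings
theorem core_eq (el al : String) : aLoop el al typeAliasesA =
    (match aliasGroup.get? el with
     | some g => if aliasGroup.get? al == some g then true else el == al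
     | none => el == al) := by
  rw [aliasGroup_eq, lookup_spec el, lookup_spec al]
  by_cases e0 : el = "int4"
  · subst e0
    by_cases a0 : al = "int4"
    · subst a0; decide
    by_cases a1 : al = "integer"
    · subst a1; decide
    by_cases a2 : al = "text"
    · subst a2; decide
    by_cases a3 : al = "varchar"
    · subst a3; decide
    by_cases a4 : al = "character varying"
    · subst a4; decide
    by_cases a5 : al = "uuid"
    · subst a5; decide
    by_cases a6 : al = "bool"
    · subst a6; decide
    by_cases a7 : al = "boolean"
    · subst a7; decide
    by_cases a8 : al = "numeric"
    · subst a8; decide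
    by_cases a9 : al = "decimal"
    · subst a9; decide
    by_cases a10 : al = "timestamptz"
    · subst a10; decide
    by_cases a11 : al = "timestamp with time zone"
    · subst a11; decide
    by_cases a12 : al = "jsonb"
    · subst a12; decide
    by_cases a13 : al = "ARRAY"
    · subst a13; decide
    simp [aLoop, typeAliasesA, a0, a1, a2, a3, a4, a5, a6, a7, a8, a9, a10, a11, a12, a13]
  by_cases e1 : el = "integer"
  · subst e1
    by_cases a0 : al = "int4"
    · subst a0; decide
    by_cases a1 : al = "integer"
    · subst a1; decide
    by_cases a2 : al = "text"
    · subst a2; decide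
    by_cases a3 : al = "varchar"
    · subst a3; decide
    by_cases a4 : al = "character varying"
    · subst a4; decide
    by_cases a5 : al = "uuid"
    · subst a5; decide
    by_cases a6 : al = "bool"
    · subst a6; decide
    by_cases a7 : al = "boolean"
    · subst a7; decide
    by_cases a8 : al = "numeric"
    · subst a8; decide
    by_cases a9 : al = "decimal"
    · subst a9; decide
    by_cases a10 : al = "timestamptz"
    · subst a10; decide
    by_cases a11 : al = "timestamp with time zone"
    · subst a11; decide
    by_cases a12 : al = "jsonb"
    · subst a12; decide
    by_cases a13 : al = "ARRAY"
    · subst a13; decide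
    simp [aLoop, typeAliasesA, a0, a1, a2, a3, a4, a5, a6, a7, a8, a9, a10, a11, a12, a13]
  by_cases e2 : el = "text"
  · subst e2
    by_cases a0 : al = "int4"
    · subst a0; decide
    by_cases a1 : al = "integer"
    · subst a1; decide
    by_cases a2 : al = "text"
    · subst a2; decide
    by_cases a3 : al = "varchar"
    · subst a3; decide
    by_cases a4 : al = "character varying"
    · subst a4; decide
    by_cases a5 : al = "uuid"
    · subst a5; decide
    by_cases a6 : al = "bool"
    · subst a6; decide
    by_cases a7 : al = "boolean"
    · subst a7; decide
    by_cases a8 : al = "numeric"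
    · subst a8; decide
    by_cases a9 : al = "decimal"
    · subst a9; decide
    by_cases a10 : al = "timestamptz"
    · subst a10; decide
    by_cases a11 : al = "timestamp with time zone"
    · subst a11; decide
    by_cases a12 : al = "jsonb"
    · subst a12; decide
    by_cases a13 : al = "ARRAY"
    · subst a13; decide
    simp [aLoop, typeAliasesA, a0, a1, a2, a3, a4, a5, a6, a7, a8, a9, a10, a11, a12, a13]
  by_cases e3 : el = "varchar"
  · subst e3
    by_cases a0 : al = "int4"
    · subst a0; decide
    by_cases a1 : al = "integer"
    · subst a1; decide
    by_cases a2 : al = "text"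
    · subst a2; decide
    by_cases a3 : al = "varchar"
    · subst a3; decide
    by_cases a4 : al = "character varying"
    · subst a4; decide
    by_cases a5 : al = "uuid"
    · subst a5; decide
    by_cases a6 : al = "bool"
    · subst a6; decide
    by_cases a7 : al = "boolean"
    · subst a7; decide
    by_cases a8 : al = "numeric"
    · subst a8; decide
    by_cases a9 : al = "decimal"
    · subst a9; decide
    by_cases a10 : al = "timestamptz"
    · subst a10; decide
    by_cases a11 : al = "timestamp with time zone"
    · subst a11; decide
    by_cases a12 : al = "jsonb"
    · subst a12; decide
    by_cases a13 : al = "ARRAY"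
    · subst a13; decide
    simp [aLoop, typeAliasesA, a0, a1, a2, a3, a4, a5, a6, a7, a8, a9, a10, a11, a12, a13]
  by_cases e4 : el = "character varying"
  · subst e4
    by_cases a0 : al = "int4"
    · subst a0; decide
    by_cases a1 : al = "integer"
    · subst a1; decide
    by_cases a2 : al = "text"
    · subst a2; decide
    by_cases a3 : al = "varchar"
    · subst a3; decide
    by_cases a4 : al = "character varying"
    · subst a4; decide
    by_cases a5 : al = "uuid"
    · subst a5; decide
    by_cases a6 : al = "bool"
    · subst a6; decide
    by_cases a7 : al = "boolean"
    · subst a7; decide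
    by_cases a8 : al = "numeric"
    · subst a8; decide
    by_cases a9 : al = "decimal"
    · subst a9; decide
    by_cases a10 : al = "timestamptz"
    · subst a10; decide
    by_cases a11 : al = "timestamp with time zone"
    · subst a11; decide
    by_cases a12 : al = "jsonb"
    · subst a12; decide
    by_cases a13 : al = "ARRAY"
    · subst a13; decide
    simp [aLoop, typeAliasesA, a0, a1, a2, a3, a4, a5, a6, a7, a8, a9, a10, a11, a12, a13]
  by_cases e5 : el = "uuid"
  · subst e5
    by_cases a0 : al = "int4"
    · subst a0; decide
    by_cases a1 : al = "integer"
    · subst a1; decide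
    by_cases a2 : al = "text"
    · subst a2; decide
    by_cases a3 : al = "varchar"
    · subst a3; decide
    by_cases a4 : al = "character varying"
    · subst a4; decide
    by_cases a5 : al = "uuid"
    · subst a5; decide
    by_cases a6 : al = "bool"
    · subst a6; decide
    by_cases a7 : al = "boolean"
    · subst a7; decide
    by_cases a8 : al = "numeric"
    · subst a8; decide
    by_cases a9 : al = "decimal"
    · subst a9; decide
    by_cases a10 : al = "timestamptz"
    · subst a10; decide
    by_cases a11 : al = "timestamp with time zone"
    · subst a11; decide
    by_cases a12 : al = "jsonb"
    · subst a12; decide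
    by_cases a13 : al = "ARRAY"
    · subst a13; decide
    simp [aLoop, typeAliasesA, a0, a1, a2, a3, a4, a5, a6, a7, a8, a9, a10, a11, a12, a13]
  by_cases e6 : el = "bool"
  · subst e6
    by_cases a0 : al = "int4"
    · subst a0; decide
    by_cases a1 : al = "integer"
    · subst a1; decide
    by_cases a2 : al = "text"
    · subst a2; decide
    by_cases a3 : al = "varchar"
    · subst a3; decide
    by_cases a4 : al = "character varying"
    · subst a4; decide
    by_cases a5 : al = "uuid"
    · subst a5; decide
    by_cases a6 : al = "bool"
    · subst a6; decide
    by_cases a7 : al = "boolean"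
    · subst a7; decide
    by_cases a8 : al = "numeric"
    · subst a8; decide
    by_cases a9 : al = "decimal"
    · subst a9; decide
    by_cases a10 : al = "timestamptz"
    · subst a10; decide
    by_cases a11 : al = "timestamp with time zone"
    · subst a11; decide
    by_cases a12 : al = "jsonb"
    · subst a12; decide
    by_cases a13 : al = "ARRAY"
    · subst a13; decide
    simp [aLoop, typeAliasesA, a0, a1, a2, a3, a4, a5, a6, a7, a8, a9, a10, a11, a12, a13]
  by_cases e7 : el = "boolean"
  · subst e7
    by_cases a0 : al = "int4"
    · subst a0; decide
    by_cases a1 : al = "integer"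
    · subst a1; decide
    by_cases a2 : al = "text"
    · subst a2; decide
    by_cases a3 : al = "varchar"
    · subst a3; decide
    by_cases a4 : al = "character varying"
    · subst a4; decide
    by_cases a5 : al = "uuid"
    · subst a5; decide
    by_cases a6 : al = "bool"
    · subst a6; decide
    by_cases a7 : al = "boolean"
    · subst a7; decide
    by_cases a8 : al = "numeric"
    · subst a8; decide
    by_cases a9 : al = "decimal"
    · subst a9; decide
    by_cases a10 : al = "timestamptz"
    · subst a10; decide
    by_cases a11 : al = "timestamp with time zone"
    · subst a11; decide
    by_cases a12 : al = "jsonb"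
    · subst a12; decide
    by_cases a13 : al = "ARRAY"
    · subst a13; decide
    simp [aLoop, typeAliasesA, a0, a1, a2, a3, a4, a5, a6, a7, a8, a9, a10, a11, a12, a13]
  by_cases e8 : el = "numeric"
  · subst e8
    by_cases a0 : al = "int4"
    · subst a0; decide
    by_cases a1 : al = "integer"
    · subst a1; decide
    by_cases a2 : al = "text"
    · subst a2; decide
    by_cases a3 : al = "varchar"
    · subst a3; decide
    by_cases a4 : al = "character varying"
    · subst a4; decide
    by_cases a5 : al = "uuid"
    · subst a5; decide
    by_cases a6 : al = "bool"
    · subst a6; decide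
    by_cases a7 : al = "boolean"
    · subst a7; decide
    by_cases a8 : al = "numeric"
    · subst a8; decide
    by_cases a9 : al = "decimal"
    · subst a9; decide
    by_cases a10 : al = "timestamptz"
    · subst a10; decide
    by_cases a11 : al = "timestamp with time zone"
    · subst a11; decide
    by_cases a12 : al = "jsonb"
    · subst a12; decide
    by_cases a13 : al = "ARRAY"
    · subst a13; decide
    simp [aLoop, typeAliasesA, a0, a1, a2, a3, a4, a5, a6, a7, a8, a9, a10, a11, a12, a13]
  by_cases e9 : el = "decimal"
  · subst e9
    by_cases a0 : al = "int4"
    · subst a0; decide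
    by_cases a1 : al = "integer"
    · subst a1; decide
    by_cases a2 : al = "text"
    · subst a2; decide
    by_cases a3 : al = "varchar"
    · subst a3; decide
    by_cases a4 : al = "character varying"
    · subst a4; decide
    by_cases a5 : al = "uuid"
    · subst a5; decide
    by_cases a6 : al = "bool"
    · subst a6; decide
    by_cases a7 : al = "boolean"
    · subst a7; decide
    by_cases a8 : al = "numeric"
    · subst a8; decide
    by_cases a9 : al = "decimal"
    · subst a9; decide
    by_cases a10 : al = "timestamptz"
    · subst a10; decide
    by_cases a11 : al = "timestamp with time zone"
    · subst a11; decide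
    by_cases a12 : al = "jsonb"
    · subst a12; decide
    by_cases a13 : al = "ARRAY"
    · subst a13; decide
    simp [aLoop, typeAliasesA, a0, a1, a2, a3, a4, a5, a6, a7, a8, a9, a10, a11, a12, a13]
  by_cases e10 : el = "timestamptz"
  · subst e10
    by_cases a0 : al = "int4"
    · subst a0; decide
    by_cases a1 : al = "integer"
    · subst a1; decide
    by_cases a2 : al = "text"
    · subst a2; decide
    by_cases a3 : al = "varchar"
    · subst a3; decide
    by_cases a4 : al = "character varying"
    · subst a4; decide
    by_cases a5 : al = "uuid"
    · subst a5; decide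
    by_cases a6 : al = "bool"
    · subst a6; decide
    by_cases a7 : al = "boolean"
    · subst a7; decide
    by_cases a8 : al = "numeric"
    · subst a8; decide
    by_cases a9 : al = "decimal"
    · subst a9; decide
    by_cases a10 : al = "timestamptz"
    · subst a10; decide
    by_cases a11 : al = "timestamp with time zone"
    · subst a11; decide
    by_cases a12 : al = "jsonb"
    · subst a12; decide
    by_cases a13 : al = "ARRAY"
    · subst a13; decide
    simp [aLoop, typeAliasesA, a0, a1, a2, a3, a4, a5, a6, a7, a8, a9, a10, a11, a12, a13]
  by_cases e11 : el = "timestamp with time zone"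
  · subst e11
    by_cases a0 : al = "int4"
    · subst a0; decide
    by_cases a1 : al = "integer"
    · subst a1; decide
    by_cases a2 : al = "text"
    · subst a2; decide
    by_cases a3 : al = "varchar"
    · subst a3; decide
    by_cases a4 : al = "character varying"
    · subst a4; decide
    by_cases a5 : al = "uuid"
    · subst a5; decide
    by_cases a6 : al = "bool"
    · subst a6; decide
    by_cases a7 : al = "boolean"
    · subst a7; decide
    by_cases a8 : al = "numeric"
    · subst a8; decide
    by_cases a9 : al = "decimal"
    · subst a9; decide
    by_cases a10 : al = "timestamptz"
    · subst a10; decide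
    by_cases a11 : al = "timestamp with time zone"
    · subst a11; decide
    by_cases a12 : al = "jsonb"
    · subst a12; decide
    by_cases a13 : al = "ARRAY"
    · subst a13; decide
    simp [aLoop, typeAliasesA, a0, a1, a2, a3, a4, a5, a6, a7, a8, a9, a10, a11, a12, a13]
  by_cases e12 : el = "jsonb"
  · subst e12
    by_cases a0 : al = "int4"
    · subst a0; decide
    by_cases a1 : al = "integer"
    · subst a1; decide
    by_cases a2 : al = "text"
    · subst a2; decide
    by_cases a3 : al = "varchar"
    · subst a3; decide
    by_cases a4 : al = "character varying"
    · subst a4; decide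
    by_cases a5 : al = "uuid"
    · subst a5; decide
    by_cases a6 : al = "bool"
    · subst a6; decide
    by_cases a7 : al = "boolean"
    · subst a7; decide
    by_cases a8 : al = "numeric"
    · subst a8; decide
    by_cases a9 : al = "decimal"
    · subst a9; decide
    by_cases a10 : al = "timestamptz"
    · subst a10; decide
    by_cases a11 : al = "timestamp with time zone"
    · subst a11; decide
    by_cases a12 : al = "jsonb"
    · subst a12; decide
    by_cases a13 : al = "ARRAY"
    · subst a13; decide
    simp [aLoop, typeAliasesA, a0, a1, a2, a3, a4, a5, a6, a7, a8, a9, a10, a11, a12, a13]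
  by_cases e13 : el = "ARRAY"
  · subst e13
    by_cases a0 : al = "int4"
    · subst a0; decide
    by_cases a1 : al = "integer"
    · subst a1; decide
    by_cases a2 : al = "text"
    · subst a2; decide
    by_cases a3 : al = "varchar"
    · subst a3; decide
    by_cases a4 : al = "character varying"
    · subst a4; decide
    by_cases a5 : al = "uuid"
    · subst a5; decide
    by_cases a6 : al = "bool"
    · subst a6; decide
    by_cases a7 : al = "boolean"
    · subst a7; decide
    by_cases a8 : al = "numeric"
    · subst a8; decide
    by_cases a9 : al = "decimal"
    · subst a9; decide
    by_cases a10 : al = "timestamptz"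
    · subst a10; decide
    by_cases a11 : al = "timestamp with time zone"
    · subst a11; decide
    by_cases a12 : al = "jsonb"
    · subst a12; decide
    by_cases a13 : al = "ARRAY"
    · subst a13; decide
    simp [aLoop, typeAliasesA, a0, a1, a2, a3, a4, a5, a6, a7, a8, a9, a10, a11, a12, a13]
  simp [aLoop, typeAliasesA, e0, e1, e2, e3, e4, e5, e6, e7, e8, e9, e10, e11, e12, e13]

-- ===== VERDICT (by name: the statement is the Claim_ definition above) =====
theorem types_match_py_spec : Claim_equal_types_match_py := by
  intro expected actual _
  unfold Spec_types_match_py types_match_py types_match_py_alt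
  exact core_eq (PySem.Str.lower expected) (PySem.Str.lower actual)
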